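-- pv_equiv track=rewrite | github.com/iots1/migration-toolkit | api/base/sql_query_builder.py | _apply_sort
-- ===== SOURCE A (Python) =====
-- def _apply_sort(data: list[dict], sort_str: str) -> list[dict]:
--     sort_fields = []
--     for part in sort_str.split(","):
--         part = part.strip()
--         if ":" in part:
--             field, direction = part.rsplit(":", 1)
--         else:
--             field, direction = part, "asc"
--         sort_fields.append((field.strip(), direction.strip().lower() == "asc"))
--
--     def sort_key(item):
--         keys = []
--         for field_name, ascending in sort_fields:
--             val = item.get(field_name, "")
--             if val is None:
--                 val = ""
--             keys.append((str(val), ascending))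
--         return keys
--
--     return sorted(data, key=sort_key)
-- ===== SOURCE B (Python) =====
-- def _apply_sort(data: list[dict], sort_str: str) -> list[dict]:
--     fields = []
--     for part in sort_str.split(","):
--         part = part.strip()
--         if ":" in part:
--             field = part.rsplit(":", 1)[0]
--         else:
--             field = part
--         fields.append(field.strip())
--     # (the parsed direction is dropped: in the original it is a constant per
--     # position of the composite key and never influences the order)
--
--     def precedes(a, b):
--         # True iff a must come strictly before b
--         for f in fields:
--             av = a.get(f, "")
--             bv = b.get(f, "")
--             av = "" if av is None else str(av)
--             bv = "" if bv is None else str(bv)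
--             if av != bv:
--                 return av < bv
--         return False
--
--     result = []
--     for item in data:
--         pos = 0
--         while pos < len(result) and not precedes(item, result[pos]):
--             pos += 1
--         result.insert(pos, item)
--     return result
-- ===== Notes on version B (the rewrite author's own statement) =====
-- stated objective: alternative
-- what changed: Replaces the single sorted() call with a composite list-of-tuples key by a stable insertion sort that compares two items directly field by field with early exit (the parsed-but-never-effective direction flags are dropped), inserting each item into its position in an accumulator list.
import Mathlib
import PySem

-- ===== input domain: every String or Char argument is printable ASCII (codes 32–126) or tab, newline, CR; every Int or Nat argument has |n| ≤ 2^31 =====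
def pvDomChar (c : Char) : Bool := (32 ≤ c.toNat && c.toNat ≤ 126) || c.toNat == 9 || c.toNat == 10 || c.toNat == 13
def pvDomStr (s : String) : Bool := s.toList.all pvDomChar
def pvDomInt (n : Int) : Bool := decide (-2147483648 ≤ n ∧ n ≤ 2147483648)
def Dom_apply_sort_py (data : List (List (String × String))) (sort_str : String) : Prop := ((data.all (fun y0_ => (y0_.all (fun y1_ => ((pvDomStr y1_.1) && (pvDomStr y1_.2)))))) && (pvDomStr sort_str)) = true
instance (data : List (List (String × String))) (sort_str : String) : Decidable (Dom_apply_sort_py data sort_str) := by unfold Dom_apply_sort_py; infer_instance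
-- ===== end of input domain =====

-- B replaces A's single sorted() with a composite key by a stable insertion sort that
-- compares items directly field by field (objective: alternative, not faster).
-- A does not mutate its arguments (sorted copies); B builds a fresh list too.

-- ===== PORT A =====
-- hand port of part.rsplit(":", 1) for the branch where ":" occurs in part
-- (maxsplit = 1 from the right = split at the LAST colon); exact there.
def pvRsplit1 (s : String) : String × String :=
  let rev := s.toList.reverse
  let direction := rev.takeWhile (· ≠ ':')
  let field := (rev.dropWhile (· ≠ ':')).tail
  (String.ofList field.reverse, String.ofList direction.reverse)

-- the sort_fields-building loop of A; sort_str.split(",") = split? … "," (some: sep ≠ "")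
def pvParseA (sort_str : String) : List (String × Bool) :=
  ((PySem.Str.split? sort_str ",").getD []).foldl (fun sort_fields part0 =>
    let part := PySem.Str.strip part0
    let fd : String × String :=
      if PySem.Str.isIn ":" part then pvRsplit1 part else (part, "asc")
    sort_fields ++ [(PySem.Str.strip fd.1, PySem.Str.lower (PySem.Str.strip fd.2) == "asc")]) []

-- A's sort_key: dict values are str here, so the `val is None` branch never fires and
-- str(val) = val; the (str, bool) tuples compare lexicographically → Lex (String × Bool)
def pvSortKeyA (sort_fields : List (String × Bool)) (item : List (String × String)) :
    List (Lex (String × Bool)) :=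
  sort_fields.foldl (fun keys fb =>
    let val := (PySem.Dict.ofList item).getD fb.1 ""
    keys ++ [toLex (val, fb.2)]) []

def apply_sort_py (data : List (List (String × String))) (sort_str : String) :
    List (List (String × String)) :=
  let sort_fields := pvParseA sort_str
  PySem.List.sorted data (pvSortKeyA sort_fields) false

-- ===== PORT B =====
-- the fields-building loop of B (directions are parsed off and dropped)
def pvParseB (sort_str : String) : List String :=
  ((PySem.Str.split? sort_str ",").getD []).foldl (fun fields part0 =>
    let part := PySem.Str.strip part0
    let field := if PySem.Str.isIn ":" part then (pvRsplit1 part).1 else part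
    fields ++ [PySem.Str.strip field]) []

-- B's precedes(a, b): first differing field decides
def pvPrecedes (fields : List String) (a b : List (String × String)) : Bool :=
  match fields with
  | [] => false
  | f :: rest =>
    let av := (PySem.Dict.ofList a).getD f ""
    let bv := (PySem.Dict.ofList b).getD f ""
    if av ≠ bv then decide (av < bv) else pvPrecedes rest a b

-- B's pos-scan + result.insert(pos, item), fused into one structural recursion
def pvInsertSorted (fields : List String) (item : List (String × String)) :
    List (List (String × String)) → List (List (String × String))
  | [] => [item]
  | y :: ys =>
    if pvPrecedes fields item y then item :: y :: ys else y :: pvInsertSorted fields item ys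

def apply_sort_py_alt (data : List (List (String × String))) (sort_str : String) :
    List (List (String × String)) :=
  let fields := pvParseB sort_str
  data.foldl (fun result item => pvInsertSorted fields item result) []

-- ===== PRECONDITION & SPEC =====
def Spec_apply_sort_py (data : List (List (String × String))) (sort_str : String) (out : List (List (String × String))) : Prop := out = apply_sort_py_alt data sort_str
instance (data : List (List (String × String))) (sort_str : String) (out : List (List (String × String))) : Decidable (Spec_apply_sort_py data sort_str out) := by unfold Spec_apply_sort_py; infer_instance

-- ===== CLAIM (what is proved, stated in full; the proofs are below) =====
def Claim_equal_apply_sort_py : Prop := ∀ (data : List (List (String × String))) (sort_str : String), Dom_apply_sort_py data sort_str → Spec_apply_sort_py data sort_str (apply_sort_py data sort_str)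

-- ===== LEMMAS AND PROOFS =====

-- A's key loop is a map
theorem pvSortKeyA_eq_map (fs : List (String × Bool)) (item : List (String × String)) :
    pvSortKeyA fs item
      = fs.map (fun fb => toLex ((PySem.Dict.ofList item).getD fb.1 "", fb.2)) := by
  unfold pvSortKeyA
  exact (PySem.List.foldl_append_singleton_eq_map _ fs []).trans (List.nil_append _)

-- B's field list is exactly the first components of A's sort_fields
theorem pvParseB_eq_map_fst (sort_str : String) :
    pvParseB sort_str = (pvParseA sort_str).map Prod.fst := by
  unfold pvParseA pvParseB
  rw [PySem.List.foldl_append_singleton_eq_map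
        (fun part0 => PySem.Str.strip
          (if PySem.Str.isIn ":" (PySem.Str.strip part0) then (pvRsplit1 (PySem.Str.strip part0)).1
           else PySem.Str.strip part0)) _ []]
  rw [PySem.List.foldl_append_singleton_eq_map
        (fun part0 =>
          (PySem.Str.strip
              (if PySem.Str.isIn ":" (PySem.Str.strip part0) then pvRsplit1 (PySem.Str.strip part0)
               else (PySem.Str.strip part0, "asc")).1,
           PySem.Str.lower (PySem.Str.strip
              (if PySem.Str.isIn ":" (PySem.Str.strip part0) then pvRsplit1 (PySem.Str.strip part0)
               else (PySem.Str.strip part0, "asc")).2) == "asc")) _ []]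
  simp only [List.nil_append, List.map_map]
  refine List.map_congr_left fun part0 _ => ?_
  simp only [Function.comp_apply]
  by_cases h : PySem.Str.isIn ":" (PySem.Str.strip part0) = true
  · rw [if_pos h, if_pos h]
  · rw [if_neg h, if_neg h]

-- B's direct comparison = strict comparison of A's composite keys
theorem pvPrecedes_eq_key_lt (fs : List (String × Bool)) (a b : List (String × String)) :
    pvPrecedes (fs.map Prod.fst) a b
      = decide (pvSortKeyA fs a < pvSortKeyA fs b) := by
  rw [pvSortKeyA_eq_map, pvSortKeyA_eq_map]
  induction fs with
  | nil => simp [pvPrecedes]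
  | cons fb fs ih =>
    rw [List.map_cons, List.map_cons, List.map_cons, pvPrecedes]
    by_cases h : (PySem.Dict.ofList a).getD fb.1 "" = (PySem.Dict.ofList b).getD fb.1 ""
    · rw [if_neg (by simp [h]), ih, decide_eq_decide, List.cons_lt_cons_iff, h]
      simp
    · rw [if_pos h, decide_eq_decide, List.cons_lt_cons_iff, Prod.Lex.lt_iff]
      constructor
      · intro hlt; exact Or.inl (Or.inl hlt)
      · rintro ((h1 | ⟨h1, _⟩) | ⟨heq, _⟩)
        · exact h1
        · exact absurd h1 h
        · exact absurd (congrArg (fun x => (ofLex x).1) heq) h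

-- B's insertion = PySem's insertBy under the composite key
theorem pvInsertSorted_eq_insertBy (fs : List (String × Bool)) (item : List (String × String))
    (ys : List (List (String × String))) :
    pvInsertSorted (fs.map Prod.fst) item ys
      = PySem.List.insertBy (fun a b => decide (pvSortKeyA fs a < pvSortKeyA fs b)) item ys := by
  induction ys with
  | nil => rfl
  | cons y ys ih =>
    simp only [pvInsertSorted, PySem.List.insertBy, pvPrecedes_eq_key_lt, ih]

-- ===== VERDICT (by name: the statement is the Claim_ definition above) =====
theorem apply_sort_py_spec : Claim_equal_apply_sort_py := by
  intro data sort_str _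
  unfold Spec_apply_sort_py apply_sort_py apply_sort_py_alt
  rw [PySem.List.sorted_eq_foldl_insertBy, pvParseB_eq_map_fst]
  congr 1
  funext acc x
  exact (pvInsertSorted_eq_insertBy (pvParseA sort_str) x acc).symm
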